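-- pv_equiv track=rewrite | github.com/pgalko/BambooAI | bambooai/reg_ex.py | find_main_block
-- ===== SOURCE A (Python) =====
-- from typing import List, Tuple
--
-- def find_main_block(code: str) -> Tuple[int, int, int]:
--     """Find the start and end lines of the main block and its indentation level."""
--     lines = code.splitlines()
--     start_idx = None
--     end_idx = None
--     indent = 0
--
--     for i, line in enumerate(lines):
--         if 'if __name__ == "__main__"' in line or "if __name__ == '__main__'" in line:
--             start_idx = i + 1  # Start after the if line
--             base_indent = len(line) - len(line.lstrip())
--             # Find first non-empty line in block to get indent
--             for j in range(start_idx, len(lines)):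
--                 if lines[j].strip():
--                     indent = len(lines[j]) - len(lines[j].lstrip())
--                     break
--             # Find the end of the block
--             for j in range(start_idx, len(lines)):
--                 if lines[j].strip() and len(lines[j]) - len(lines[j].lstrip()) <= base_indent:
--                     end_idx = j
--                     break
--             if end_idx is None:  # If we didn't find the end, it's the last line
--                 end_idx = len(lines)
--             break
--
--     return start_idx, end_idx, indent
-- ===== SOURCE B (Python) =====
-- def find_main_block(code: str):
--     """Find the start and end lines of the main block and its indentation level."""
--     lines = code.splitlines()
--     for i, line in enumerate(lines):
--         if 'if __name__ == "__main__"' in line or "if __name__ == '__main__'" in line: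
--             base_indent = len(line) - len(line.lstrip())
--             indent = 0
--             seen = False
--             end_idx = len(lines)
--             for j in range(i + 1, len(lines)):
--                 s = lines[j]
--                 if s.strip():
--                     if not seen:
--                         indent = len(s) - len(s.lstrip())
--                         seen = True
--                     if len(s) - len(s.lstrip()) <= base_indent:
--                         end_idx = j
--                         break
--             return i + 1, end_idx, indent
--     return None, None, 0
-- ===== Notes on version B (the rewrite author's own statement) =====
-- stated objective: simpler
-- what changed: B replaces A's two separate scans of the lines after the guard (one for the block indent, one for the block end) with a single merged early-returning pass that sets the indent on the first non-empty line and breaks at the first dedenting non-empty line, returning directly instead of break-and-fall-through.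
import Mathlib
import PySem

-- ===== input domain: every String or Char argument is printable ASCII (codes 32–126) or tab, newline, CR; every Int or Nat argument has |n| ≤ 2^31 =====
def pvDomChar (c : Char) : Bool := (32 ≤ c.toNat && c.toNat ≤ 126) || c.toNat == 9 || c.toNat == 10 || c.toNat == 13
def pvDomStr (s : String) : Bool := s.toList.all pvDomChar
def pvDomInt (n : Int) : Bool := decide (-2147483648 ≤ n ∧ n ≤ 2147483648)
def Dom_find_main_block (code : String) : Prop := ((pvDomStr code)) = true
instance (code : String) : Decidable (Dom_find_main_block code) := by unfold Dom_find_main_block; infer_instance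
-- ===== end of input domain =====

-- B merges A's two scans after the guard line into a single early-returning pass (objective: simpler).

-- shared helpers: these correspond to identical Python expressions in both sources
-- 'if __name__ == "__main__"' in line or "if __name__ == '__main__'" in line
def pvGuard (line : String) : Bool :=
  PySem.Str.isIn "if __name__ == \"__main__\"" line || PySem.Str.isIn "if __name__ == '__main__'" line
-- len(s) - len(s.lstrip())
def pvIndent (s : String) : Int := PySem.Str.len s - PySem.Str.len (PySem.Str.lstrip s)
-- truthiness of s.strip()
def pvNonEmpty (s : String) : Bool := PySem.Str.len (PySem.Str.strip s) != 0

-- ===== PORT A =====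
-- first inner loop: indent of first non-empty line (0 if none)
def pvFindIndent : List String → Int
  | [] => 0
  | l :: ls => if pvNonEmpty l then pvIndent l else pvFindIndent ls
-- second inner loop: index of first non-empty line with indent <= base
def pvFindEnd (base : Int) : List String → Int → Option Int
  | [], _ => none
  | l :: ls, j => if pvNonEmpty l && decide (pvIndent l ≤ base) then some j else pvFindEnd base ls (j + 1)
-- outer loop of A (n = len(lines), the fallback for end_idx)
def pvOuterA : List String → Int → Int → Option Int × Option Int × Int
  | [], _, _ => (none, none, 0)
  | l :: ls, i, n =>
    if pvGuard l then
      let ind := pvFindIndent ls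
      let e := match pvFindEnd (pvIndent l) ls (i + 1) with
               | some j => j
               | none => n
      (some (i + 1), some e, ind)
    else pvOuterA ls (i + 1) n

def find_main_block (code : String) : Option Int × Option Int × Int :=
  let lines := PySem.Str.splitlines code
  pvOuterA lines 0 (lines.length : Int)

-- ===== PORT B =====
-- the single merged scan of B: returns (end_idx, indent); state: seen, indent, fallback end
def pvScanB (base : Int) : List String → Int → Bool → Int → Int → Int × Int
  | [], _, _, ind, nd => (nd, ind)
  | l :: ls, j, seen, ind, nd =>
    if pvNonEmpty l then
      let ind' := if seen then ind else pvIndent l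
      if pvIndent l ≤ base then (j, ind')
      else pvScanB base ls (j + 1) true ind' nd
    else pvScanB base ls (j + 1) seen ind nd
-- outer loop of B with early return
def pvOuterB : List String → Int → Int → Option Int × Option Int × Int
  | [], _, _ => (none, none, 0)
  | l :: ls, i, n =>
    if pvGuard l then
      let r := pvScanB (pvIndent l) ls (i + 1) false 0 n
      (some (i + 1), some r.1, r.2)
    else pvOuterB ls (i + 1) n

def find_main_block_alt (code : String) : Option Int × Option Int × Int :=
  let lines := PySem.Str.splitlines code
  pvOuterB lines 0 (lines.length : Int)

-- ===== PRECONDITION & SPEC =====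
def Spec_find_main_block (code : String) (out : Option Int × Option Int × Int) : Prop := out = find_main_block_alt code
instance (code : String) (out : Option Int × Option Int × Int) : Decidable (Spec_find_main_block code out) := by unfold Spec_find_main_block; infer_instance

-- ===== CLAIM (what is proved, stated in full; the proofs are below) =====
def Claim_equal_find_main_block : Prop := ∀ (code : String), Dom_find_main_block code → Spec_find_main_block code (find_main_block code)

-- ===== LEMMAS AND PROOFS =====

-- once 'seen' is true, B's scan never changes the indent and computes A's end search
theorem pvScanB_seen (base : Int) (ls : List String) (j ind nd : Int) :
    pvScanB base ls j true ind nd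
      = ((match pvFindEnd base ls j with | some e => e | none => nd), ind) := by
  induction ls generalizing j with
  | nil => rfl
  | cons l t ih =>
    simp only [pvScanB, pvFindEnd]
    by_cases h : pvNonEmpty l = true
    · by_cases h2 : pvIndent l ≤ base
      · simp [h, h2]
      · simp [h, h2, ih]
    · simp [h, ih]

-- B's scan from the initial state returns A's (end fallback, first-non-empty indent) pair
theorem pvScanB_fresh (base : Int) (ls : List String) (j nd : Int) :
    pvScanB base ls j false 0 nd
      = ((match pvFindEnd base ls j with | some e => e | none => nd), pvFindIndent ls) := by
  induction ls generalizing j with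
  | nil => rfl
  | cons l t ih =>
    simp only [pvScanB, pvFindEnd, pvFindIndent]
    by_cases h : pvNonEmpty l = true
    · by_cases h2 : pvIndent l ≤ base
      · simp [h, h2]
      · simp [h, h2, pvScanB_seen]
    · simp [h, ih]

theorem pvOuter_eq (ls : List String) (i n : Int) : pvOuterA ls i n = pvOuterB ls i n := by
  induction ls generalizing i with
  | nil => rfl
  | cons l t ih =>
    simp only [pvOuterA, pvOuterB]
    by_cases h : pvGuard l = true
    · simp [h, pvScanB_fresh]
    · simp [h, ih]

-- ===== VERDICT (by name: the statement is the Claim_ definition above) =====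
theorem find_main_block_spec : Claim_equal_find_main_block := by
  intro code _
  unfold Spec_find_main_block find_main_block find_main_block_alt
  simp [pvOuter_eq]
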